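-- pv_equiv track=rewrite | github.com/DeanLight/spannerlib | src/rgxlog-interpreter/tests/test_introduction_tutorial.py | str_relation_to_list
-- ===== SOURCE A (Python) =====
-- from typing import Tuple
--
-- def str_relation_to_list(table: str, start: int) -> Tuple[list, int]:
--     offset_cnt = 0
--     relations = list()
--     for rel in table[start:]:
--         offset_cnt += 1
--         relations.append(rel)
--         if rel == "\n":
--             break
--
--     return relations, offset_cnt
-- ===== SOURCE B (Python) =====
-- def str_relation_to_list(table, start):
--     idx = table.find("\n", start)
--     if idx == -1:
--         result = list(table[start:])
--     else:
--         result = list(table[start:idx + 1])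
--     return result, len(result)
-- ===== Notes on version B (the rewrite author's own statement) =====
-- stated objective: idiomatic
-- what changed: Replaces the char-by-char loop with accumulated counter and break by a single str.find for the newline plus one slice, deriving the count from len(result).
import Mathlib
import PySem

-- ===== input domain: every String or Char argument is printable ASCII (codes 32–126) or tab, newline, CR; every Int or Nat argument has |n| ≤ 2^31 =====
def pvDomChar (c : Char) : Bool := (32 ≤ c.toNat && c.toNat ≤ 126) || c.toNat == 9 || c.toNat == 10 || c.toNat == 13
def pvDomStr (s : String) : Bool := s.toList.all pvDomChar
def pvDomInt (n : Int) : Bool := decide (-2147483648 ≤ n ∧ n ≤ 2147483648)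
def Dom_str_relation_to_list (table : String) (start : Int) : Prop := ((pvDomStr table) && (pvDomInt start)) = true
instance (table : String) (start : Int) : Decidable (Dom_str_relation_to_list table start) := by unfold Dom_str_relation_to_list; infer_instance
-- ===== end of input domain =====

-- B replaces A's char-by-char break loop by a single newline search (str.find) plus one slice,
-- taking the count from the slice's length (idiomatic; same asymptotic cost).


-- ===== PORT A =====
-- A's for-loop over table[start:] with append + counter and break at '\n'
def pvLoopA : List Char → List String × Int
  | [] => ([], 0)
  | c :: rest =>
    if c = '\n' then ([String.ofList [c]], 1)
    else
      let (r, n) := pvLoopA rest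
      (String.ofList [c] :: r, n + 1)

def str_relation_to_list (table : String) (start : Int) : List String × Int :=
  pvLoopA (PySem.List.slice table.toList (some start) none)

-- ===== PORT B =====
def str_relation_to_list_alt (table : String) (start : Int) : List String × Int :=
  let idx := PySem.Str.findFrom table "\n" start
  let result :=
    if idx = -1 then PySem.List.slice table.toList (some start) none
    else PySem.List.slice table.toList (some start) (some (idx + 1))
  (result.map (fun c => String.ofList [c]), (result.length : Int))

-- ===== PRECONDITION & SPEC =====
def Spec_str_relation_to_list (table : String) (start : Int) (out : List String × Int) : Prop := out = str_relation_to_list_alt table start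
instance (table : String) (start : Int) (out : List String × Int) : Decidable (Spec_str_relation_to_list table start out) := by unfold Spec_str_relation_to_list; infer_instance

-- ===== CLAIM (what is proved, stated in full; the proofs are below) =====
def Claim_equal_str_relation_to_list : Prop := ∀ (table : String) (start : Int), Dom_str_relation_to_list table start → Spec_str_relation_to_list table start (str_relation_to_list table start)

-- ===== LEMMAS AND PROOFS =====

lemma pvGo_eq (t : List Char) (k : ℕ) :
    PySem.Chars.find.go ['\n'] t k =
      if '\n' ∈ t then ((k + t.findIdx (· = '\n') : ℕ) : Int) else -1 := by
  induction t generalizing k with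
  | nil => simp [PySem.Chars.find.go]
  | cons c rest ih =>
    by_cases hc : c = '\n'
    · subst hc
      simp [PySem.Chars.find.go, List.isPrefixOf, List.findIdx_cons]
    · have hpre : List.isPrefixOf ['\n'] (c :: rest) = false := by
        simp [List.isPrefixOf, Ne.symm hc]
      rw [show PySem.Chars.find.go ['\n'] (c :: rest) k
            = PySem.Chars.find.go ['\n'] rest (k + 1) by
        simp [PySem.Chars.find.go, hpre]]
      rw [ih]
      simp only [List.findIdx_cons, List.mem_cons, hc, decide_eq_true_eq, or_false,
        show ('\n' = c) = False by simp [Ne.symm hc], false_or, decide_false,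
        cond_false]
      split_ifs with h
      · push_cast; ring
      · rfl

lemma pvFind_eq (t : List Char) :
    PySem.Chars.find t ['\n'] =
      if '\n' ∈ t then ((t.findIdx (· = '\n') : ℕ) : Int) else -1 := by
  have := pvGo_eq t 0
  simpa [PySem.Chars.find] using this

lemma pvLoopA_eq (t : List Char) :
    pvLoopA t =
      if '\n' ∈ t then
        ((t.take (t.findIdx (· = '\n') + 1)).map (fun c => String.ofList [c]),
          ((t.findIdx (· = '\n') : ℕ) : Int) + 1)
      else (t.map (fun c => String.ofList [c]), (t.length : Int)) := by
  induction t with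
  | nil => simp [pvLoopA]
  | cons c rest ih =>
    by_cases hc : c = '\n'
    · subst hc
      simp [pvLoopA, List.findIdx_cons]
    · rw [show pvLoopA (c :: rest)
            = (let (r, n) := pvLoopA rest; (String.ofList [c] :: r, n + 1)) by
        simp [pvLoopA, hc]]
      rw [ih]
      simp only [List.findIdx_cons, List.mem_cons, hc, decide_eq_true_eq,
        show ('\n' = c) = False by simp [Ne.symm hc], false_or, decide_false,
        cond_false]
      by_cases h : '\n' ∈ rest <;>
        simp [List.findIdx_cons, hc, Ne.symm hc, h, List.take_succ_cons] <;>
        push_cast <;> ring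

-- findFrom with a general Int start equals the clamped form (for the nonempty needle ['\n'])
lemma pvFindFrom_clamped (s : List Char) (start : Int) :
    PySem.Chars.findFrom s ['\n'] start none =
      (if PySem.Chars.find (s.drop (PySem.List.clampIdx s.length start)) ['\n'] = -1 then -1
       else ((PySem.List.clampIdx s.length start : ℕ) : Int)
            + PySem.Chars.find (s.drop (PySem.List.clampIdx s.length start)) ['\n']) := by
  by_cases hneg : start < 0
  · by_cases hz : start + (s.length : Int) < 0
    · have hcl : PySem.List.clampIdx s.length start = 0 := by
        unfold PySem.List.clampIdx; split_ifs <;> omega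
      rw [hcl]
      unfold PySem.Chars.findFrom
      simp [hneg, hz]
    · have hcl : PySem.List.clampIdx s.length start = (start + (s.length : Int)).toNat := by
        unfold PySem.List.clampIdx; split_ifs <;> omega
      have hc2 : (((start + (s.length : Int)).toNat : ℕ) : Int) = start + s.length := by omega
      rw [hcl]
      unfold PySem.Chars.findFrom
      simp [hneg, hz, hc2, List.take_length]
      intro h _
      omega
  · by_cases hbig : (s.length : Int) < start
    · have hcl : PySem.List.clampIdx s.length start = s.length := by
        unfold PySem.List.clampIdx; split_ifs <;> omega
      have hdrop : s.drop s.length = ([] : List Char) := by simp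
      rw [hcl, hdrop]
      unfold PySem.Chars.findFrom
      simp [hneg, hbig]
      intro hf
      exact (hf (by decide)).elim
    · have hcl : PySem.List.clampIdx s.length start = start.toNat := by
        unfold PySem.List.clampIdx; split_ifs <;> omega
      have hc2 : ((start.toNat : ℕ) : Int) = start := by omega
      rw [hcl]
      unfold PySem.Chars.findFrom
      simp [hneg, hbig, hc2, List.take_length]

lemma pvSlice_some_some {α : Type} (xs : List α) (a b : Int) :
    PySem.List.slice xs (some a) (some b) =
      (xs.drop (PySem.List.clampIdx xs.length a)).take
        (PySem.List.clampIdx xs.length b - PySem.List.clampIdx xs.length a) := rfl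

-- ===== VERDICT (by name: the statement is the Claim_ definition above) =====
theorem str_relation_to_list_spec : Claim_equal_str_relation_to_list := by
  intro table start _
  unfold Spec_str_relation_to_list str_relation_to_list str_relation_to_list_alt
  set s := table.toList with hs
  set k := PySem.List.clampIdx s.length start with hkdef
  have hk : k ≤ s.length := PySem.List.clampIdx_le s.length start
  have hnl : ("\n" : String).toList = ['\n'] := by decide
  have hslice : PySem.List.slice s (some start) none = s.drop k := by
    rw [PySem.List.slice_some_none]
  set t := s.drop k with htdef
  have hff : PySem.Str.findFrom table "\n" start =
      (if PySem.Chars.find t ['\n'] = -1 then -1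
       else ((k : ℕ) : Int) + PySem.Chars.find t ['\n']) := by
    rw [PySem.Str.findFrom_eq, hnl, ← hs, pvFindFrom_clamped]
  have htlen : t.length = s.length - k := by
    simp [htdef]
  rw [hff, pvFind_eq t]
  by_cases hmem : '\n' ∈ t
  · set j := t.findIdx (· = '\n') with hjdef
    have hj : j < t.length := List.findIdx_lt_length_of_exists ⟨'\n', hmem, by simp⟩
    have hcond1 : ¬ (((j : ℕ) : Int) = -1) := by omega
    have hcond2 : ¬ (((k : ℕ) : Int) + ((j : ℕ) : Int) = -1) := by omega
    simp only [hmem, if_true, hcond1, if_false, hcond2]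
    have hslice2 : PySem.List.slice s (some start) (some (((k:ℕ):Int) + ((j:ℕ):Int) + 1))
        = t.take (j + 1) := by
      have hcast : ((k:ℕ):Int) + ((j:ℕ):Int) + 1 = (((k + j + 1 : ℕ)) : Int) := by push_cast; ring
      rw [hcast, pvSlice_some_some]
      have hc2 : PySem.List.clampIdx s.length ((k + j + 1 : ℕ) : Int) = k + j + 1 := by
        rw [PySem.List.clampIdx_natCast]; omega
      rw [← hkdef, hc2]
      have h3 : k + j + 1 - k = j + 1 := by omega
      rw [h3]
    rw [hslice2, hslice, pvLoopA_eq t]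
    simp only [hmem, if_true, ← hjdef]
    have hlen : (t.take (j + 1)).length = j + 1 := by
      rw [List.length_take]; omega
    rw [hlen]
    constructor <;> push_cast <;> ring_nf
  · simp only [hmem, if_false, if_true, hslice]
    rw [pvLoopA_eq t]
    simp [hmem]
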